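-- pv_equiv track=rewrite | github.com/jevinskie/instruction-decoding-optimization-research | python/src/instdec/logic.py | term_from_bit_mask_and_pattern
-- ===== SOURCE A (Python) =====
-- def term_from_bit_mask_and_pattern(bm: int, bp: int) -> list[int]:
--     """Parse a 32-bit term from bitmask and bitpattern into a list of literals."""
--     literals: list[int] = []
--     for j in range(32):
--         if (1 << j) & bm:
--             if (1 << j) & bp:
--                 literals.append(j + 1)
--             else:
--                 literals.append(-(j + 1))
--     return literals
-- ===== SOURCE B (Python) =====
-- def term_from_bit_mask_and_pattern(bm: int, bp: int) -> list[int]: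
--     """Parse a 32-bit term from bitmask and bitpattern into a list of literals."""
--     m = bm & 0xFFFFFFFF
--     literals: list[int] = []
--     while m:
--         j = m.bit_length() - 1          # highest set bit still present
--         literals.append(j + 1 if (bp >> j) & 1 else -(j + 1))
--         m -= 1 << j
--     literals.reverse()
--     return literals
-- ===== Notes on version B (the rewrite author's own statement) =====
-- stated objective: alternative
-- what changed: Instead of testing all 32 bit positions in a fixed-range loop, B masks bm to its low 32 bits and repeatedly strips the highest set bit (bit_length-1), emitting literals for set positions only and reversing at the end, so the loop runs once per set bit rather than 32 times.
import Mathlib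
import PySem

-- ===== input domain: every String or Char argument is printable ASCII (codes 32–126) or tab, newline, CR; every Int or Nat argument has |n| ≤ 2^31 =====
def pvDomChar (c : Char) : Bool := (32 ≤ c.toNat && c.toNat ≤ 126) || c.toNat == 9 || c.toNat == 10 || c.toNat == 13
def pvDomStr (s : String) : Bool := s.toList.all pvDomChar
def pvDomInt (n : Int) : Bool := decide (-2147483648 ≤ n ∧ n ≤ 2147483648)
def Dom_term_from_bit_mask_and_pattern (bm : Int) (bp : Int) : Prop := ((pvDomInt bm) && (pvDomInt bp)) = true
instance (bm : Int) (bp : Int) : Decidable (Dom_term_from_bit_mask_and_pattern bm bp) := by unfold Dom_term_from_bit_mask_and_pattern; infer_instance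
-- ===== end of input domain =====

-- B walks only the set bits of bm & 0xFFFFFFFF (highest first, output reversed) instead of
-- testing all 32 positions; same return value, objective: alternative algorithm.

-- ===== PORT A =====
-- for j in range(32): if (1 << j) & bm: literals.append(j+1 if (1 << j) & bp else -(j+1))
-- (Python truthiness of an int is `≠ 0`; `&` on Python ints is Int.land)
def term_from_bit_mask_and_pattern (bm : Int) (bp : Int) : List Int :=
  (PySem.List.pyRange 0 32 1).foldl
    (fun (literals : List Int) (j : Int) =>
      if Int.land (1 <<< j) bm ≠ 0 then
        if Int.land (1 <<< j) bp ≠ 0 then literals ++ [j + 1]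
        else literals ++ [-(j + 1)]
      else literals) []

-- ===== PORT B =====
-- the `while m:` loop of Source B; `m = bm & 0xFFFFFFFF` is nonnegative, so it is carried as a Nat.
-- `m.bit_length() - 1` for m > 0 is Nat.log2 m; `m -= 1 << j` is m - 2 ^ j.
def termFromBitsLoop (bp : Int) (m : Nat) (literals : List Int) : List Int :=
  if hm : m = 0 then literals
  else
    let j := m.log2
    termFromBitsLoop bp (m - 2 ^ j)
      (literals ++ [if Int.land (bp >>> ((j : Nat) : Int)) 1 = 1 then ((j : Nat) : Int) + 1
                    else -(((j : Nat) : Int) + 1)])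
termination_by m
decreasing_by
  have h1 : 2 ^ m.log2 ≤ m := Nat.log2_self_le hm
  have h2 : 0 < 2 ^ m.log2 := Nat.two_pow_pos m.log2
  omega

def term_from_bit_mask_and_pattern_alt (bm : Int) (bp : Int) : List Int :=
  (termFromBitsLoop bp (Int.land bm 4294967295).toNat []).reverse

-- ===== PRECONDITION & SPEC =====
def Spec_term_from_bit_mask_and_pattern (bm : Int) (bp : Int) (out : List Int) : Prop := out = term_from_bit_mask_and_pattern_alt bm bp
instance (bm : Int) (bp : Int) (out : List Int) : Decidable (Spec_term_from_bit_mask_and_pattern bm bp out) := by unfold Spec_term_from_bit_mask_and_pattern; infer_instance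

-- ===== CLAIM (what is proved, stated in full; the proofs are below) =====
def Claim_equal_term_from_bit_mask_and_pattern : Prop := ∀ (bm : Int) (bp : Int), Dom_term_from_bit_mask_and_pattern bm bp → Spec_term_from_bit_mask_and_pattern bm bp (term_from_bit_mask_and_pattern bm bp)

-- ===== LEMMAS AND PROOFS =====

-- literal for bit j, and the ascending literal list of the low 32 bits of m
def pvLit (bp : Int) (j : Nat) : Int := if bp.testBit j then (j : Int) + 1 else -((j : Int) + 1)
def pvAsc (bp : Int) (m : Nat) : List Int :=
  (List.range 32).flatMap (fun j => if m.testBit j then [pvLit bp j] else [])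

theorem pvFlatMapCongr {α β : Type} {l : List α} {f g : α → List β}
    (h : ∀ a ∈ l, f a = g a) : l.flatMap f = l.flatMap g := by
  induction l with
  | nil => rfl
  | cons a l ih =>
    simp only [List.flatMap_cons, h a (List.mem_cons_self), ih (fun b hb => h b (List.mem_cons_of_mem a hb))]

theorem pvFlatMapTrunc {f : Nat → List Int} {n1 n2 : Nat} (h12 : n1 ≤ n2)
    (h : ∀ j, n1 ≤ j → f j = []) :
    (List.range n2).flatMap f = (List.range n1).flatMap f := by
  rw [show n2 = n1 + (n2 - n1) by omega, List.range_add, List.flatMap_append]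
  have : ((List.range (n2 - n1)).map (n1 + ·)).flatMap f = [] := by
    apply List.flatMap_eq_nil_iff.mpr
    intro a ha
    rcases List.mem_map.mp ha with ⟨i, _, rfl⟩
    exact h _ (Nat.le_add_right _ _)
  rw [this, List.append_nil]

theorem pvLdiffTwoPow (k n : Nat) : Nat.ldiff (2 ^ k) n = if n.testBit k then 0 else 2 ^ k := by
  apply Nat.eq_of_testBit_eq
  intro i
  rw [Nat.testBit_ldiff]
  by_cases hik : k = i
  · subst hik
    cases h : n.testBit k <;> simp
  · cases h : n.testBit k <;>
      simp [Nat.testBit_two_pow_of_ne hik]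

theorem pvLdiffOne (n : Nat) : Nat.ldiff 1 n = if n.testBit 0 then 0 else 1 := by
  simpa using pvLdiffTwoPow 0 n

-- Python `(1 << k) & x != 0`  ↔  bit k of x (two's complement)
theorem pvLandA (x : Int) (k : Nat) :
    (Int.land ((1 : Int) <<< ((k : Nat) : Int)) x ≠ 0) ↔ x.testBit k = true := by
  have h1 : (1 : Int) <<< ((k : Nat) : Int) = (((2 ^ k : Nat) : Int)) := by
    rw [show (1 : Int) = ((1 : Nat) : Int) from rfl, Int.shiftLeft_natCast,
      Nat.shiftLeft_eq, one_mul]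
  rw [h1]
  cases x with
  | ofNat n =>
    show ((((2 ^ k) &&& n : Nat) : Int) ≠ 0) ↔ _
    rw [Nat.two_pow_and]
    cases h : n.testBit k <;> simp [h, Int.testBit]
  | negSucc n =>
    show (((Nat.ldiff (2 ^ k) n : Nat) : Int) ≠ 0) ↔ _
    rw [pvLdiffTwoPow]
    cases h : n.testBit k <;> simp [h, Int.testBit]

-- Python `(x >> k) & 1 == 1`  ↔  bit k of x (two's complement)
theorem pvLandB (x : Int) (k : Nat) :
    (Int.land (x >>> ((k : Nat) : Int)) 1 = 1) ↔ x.testBit k = true := by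
  cases x with
  | ofNat n =>
    have h1 : (Int.ofNat n) >>> ((k : Nat) : Int) = ((n >>> k : Nat) : Int) :=
      Int.shiftRight_natCast n k
    rw [h1]
    show ((((n >>> k) &&& 1 : Nat) : Int) = 1) ↔ _
    rw [Nat.and_one_is_mod]
    constructor
    · intro h
      have : (n >>> k) % 2 = 1 := by exact_mod_cast h
      have := Nat.mod_two_eq_one_iff_testBit_zero.mp this
      simpa [Int.testBit, Nat.testBit_shiftRight] using this
    · intro h
      have hb : (n >>> k).testBit 0 = true := by
        simpa [Nat.testBit_shiftRight] using h
      have : (n >>> k) % 2 = 1 := Nat.mod_two_eq_one_iff_testBit_zero.mpr hb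
      exact_mod_cast congrArg (Nat.cast : Nat → Int) this
  | negSucc n =>
    have h1 : (Int.negSucc n) >>> ((k : Nat) : Int) = Int.negSucc (n >>> k) :=
      Int.shiftRight_negSucc n k
    rw [h1]
    show (((Nat.ldiff 1 (n >>> k) : Nat) : Int) = 1) ↔ _
    rw [pvLdiffOne]
    cases h : (n >>> k).testBit 0 <;>
      simp_all [Int.testBit]

-- bits of the masked value `(bm & 0xFFFFFFFF)` as a Nat
theorem pvMaskBit (bm : Int) (k : Nat) :
    ((Int.land bm 4294967295).toNat).testBit k = (bm.testBit k && decide (k < 32)) := by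
  have h32 : (4294967295 : Int) = (((2 ^ 32 - 1 : Nat) : Int)) := by norm_num
  rw [h32]
  cases bm with
  | ofNat n =>
    show ((((n &&& (2 ^ 32 - 1) : Nat) : Int)).toNat).testBit k = _
    rw [Int.toNat_natCast, Nat.testBit_and, Nat.testBit_two_pow_sub_one]
    simp [Int.testBit]
  | negSucc n =>
    show ((((Nat.ldiff (2 ^ 32 - 1) n : Nat) : Int)).toNat).testBit k = _
    rw [Int.toNat_natCast, Nat.testBit_ldiff, Nat.testBit_two_pow_sub_one]
    simp [Int.testBit, Bool.and_comm]

theorem pvMaskHigh (bm : Int) : ∀ i, 32 ≤ i → ((Int.land bm 4294967295).toNat).testBit i = false := by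
  intro i hi
  rw [pvMaskBit]
  simp [Nat.not_lt.mpr hi]

-- A's fold, as a flatMap
theorem pvFoldA (bm bp : Int) (l : List Int) (acc : List Int) :
    l.foldl
      (fun (literals : List Int) (j : Int) =>
        if Int.land (1 <<< j) bm ≠ 0 then
          if Int.land (1 <<< j) bp ≠ 0 then literals ++ [j + 1]
          else literals ++ [-(j + 1)]
        else literals) acc
    = acc ++ l.flatMap (fun (j : Int) =>
        if Int.land (1 <<< j) bm ≠ 0 then
          if Int.land (1 <<< j) bp ≠ 0 then [j + 1] else [-(j + 1)]
        else []) := by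
  induction l generalizing acc with
  | nil => simp
  | cons a l ih =>
    simp only [List.foldl_cons, List.flatMap_cons, ih]
    split_ifs <;> simp

-- A computes the ascending literal list of the low 32 bits of bm
theorem pvAscA (bm bp : Int) :
    term_from_bit_mask_and_pattern bm bp = pvAsc bp (Int.land bm 4294967295).toNat := by
  rw [term_from_bit_mask_and_pattern, pvFoldA, List.nil_append,
    PySem.List.pyRange_one, show ((32 : Int) - 0).toNat = 32 by decide, List.flatMap_map, pvAsc]
  apply pvFlatMapCongr
  intro k hk
  have hk32 : k < 32 := List.mem_range.mp hk
  simp only [zero_add]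
  by_cases hm : bm.testBit k = true
  · rw [if_pos ((pvLandA bm k).mpr hm)]
    have hmb : ((Int.land bm 4294967295).toNat).testBit k = true := by
      rw [pvMaskBit, hm]; simp [hk32]
    rw [if_pos hmb]
    by_cases hp : bp.testBit k = true
    · rw [if_pos ((pvLandA bp k).mpr hp), pvLit, if_pos hp]
    · rw [if_neg (fun hc => hp ((pvLandA bp k).mp hc)), pvLit,
        if_neg (fun hc => hp hc)]
  · rw [if_neg (fun hc => hm ((pvLandA bm k).mp hc))]
    have hmb : ((Int.land bm 4294967295).toNat).testBit k = false := by
      rw [pvMaskBit]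
      cases h : bm.testBit k
      · simp
      · exact absurd h hm
    rw [hmb]
    simp

theorem pvTestBitLog2 (m : Nat) (hm0 : m ≠ 0) : m.testBit m.log2 = true := by
  have h2 : 2 ^ m.log2 ≤ m := Nat.log2_self_le hm0
  have h3 : m < 2 ^ (m.log2 + 1) := Nat.lt_log2_self
  have hpow : 2 ^ (m.log2 + 1) = 2 ^ m.log2 * 2 := pow_succ 2 m.log2
  have hr : m - 2 ^ m.log2 < 2 ^ m.log2 := by omega
  have heq := Nat.testBit_two_pow_add_eq (m - 2 ^ m.log2) m.log2
  rw [show 2 ^ m.log2 + (m - 2 ^ m.log2) = m by omega] at heq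
  rw [heq, Nat.testBit_lt_two_pow hr]
  rfl

theorem pvLog2Lt (m : Nat) (hm0 : m ≠ 0)
    (hb : ∀ i, 32 ≤ i → m.testBit i = false) : m.log2 < 32 := by
  by_contra h
  have := hb m.log2 (Nat.not_lt.mp h)
  rw [pvTestBitLog2 m hm0] at this
  exact Bool.noConfusion this

-- stripping the highest set bit splits off the last literal
theorem pvAscSplit (bp : Int) (m : Nat) (hm0 : m ≠ 0)
    (hb : ∀ i, 32 ≤ i → m.testBit i = false) :
    pvAsc bp m = pvAsc bp (m - 2 ^ m.log2) ++ [pvLit bp m.log2] := by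
  have h2 : 2 ^ m.log2 ≤ m := Nat.log2_self_le hm0
  have h3 : m < 2 ^ (m.log2 + 1) := Nat.lt_log2_self
  have hpow : 2 ^ (m.log2 + 1) = 2 ^ m.log2 * 2 := pow_succ 2 m.log2
  have hr : m - 2 ^ m.log2 < 2 ^ m.log2 := by omega
  have hbit0 : m.testBit m.log2 = true := pvTestBitLog2 m hm0
  have hj0 : m.log2 < 32 := pvLog2Lt m hm0 hb
  have hlow : ∀ j, j < m.log2 → m.testBit j = (m - 2 ^ m.log2).testBit j := by
    intro j hj
    have := Nat.testBit_two_pow_add_gt hj (m - 2 ^ m.log2)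
    rw [show 2 ^ m.log2 + (m - 2 ^ m.log2) = m by omega] at this
    exact this
  have hrhigh : ∀ j, m.log2 ≤ j → (m - 2 ^ m.log2).testBit j = false := by
    intro j hj
    exact Nat.testBit_lt_two_pow
      (Nat.lt_of_lt_of_le hr (Nat.pow_le_pow_right (by norm_num) hj))
  have hmhigh : ∀ j, m.log2 + 1 ≤ j → m.testBit j = false := by
    intro j hj
    exact Nat.testBit_lt_two_pow
      (Nat.lt_of_lt_of_le h3 (Nat.pow_le_pow_right (by norm_num) hj))
  rw [pvAsc, pvAsc]
  rw [pvFlatMapTrunc (f := fun j => if m.testBit j then [pvLit bp j] else [])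
      (by omega : m.log2 + 1 ≤ 32) (by intro j hj; simp [hmhigh j hj])]
  rw [pvFlatMapTrunc (f := fun j => if (m - 2 ^ m.log2).testBit j then [pvLit bp j] else [])
      (by omega : m.log2 ≤ 32) (by intro j hj; simp [hrhigh j hj])]
  rw [List.range_succ, List.flatMap_append]
  congr 1
  · apply pvFlatMapCongr
    intro j hj
    rw [hlow j (List.mem_range.mp hj)]
  · simp [hbit0]

-- the while loop accumulates the reversed ascending list
theorem pvLoopB (bp : Int) : ∀ m, (∀ i, 32 ≤ i → m.testBit i = false) → ∀ acc,
    termFromBitsLoop bp m acc = acc ++ (pvAsc bp m).reverse := by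
  intro m
  induction m using Nat.strong_induction_on with
  | _ m IH =>
    intro hb acc
    rw [termFromBitsLoop]
    by_cases hm0 : m = 0
    · rw [dif_pos hm0, hm0]
      have h0 : pvAsc bp 0 = [] := by simp [pvAsc, Nat.zero_testBit]
      rw [h0]
      simp
    · rw [dif_neg hm0]
      show termFromBitsLoop bp (m - 2 ^ m.log2)
          (acc ++ [if Int.land (bp >>> ((m.log2 : Nat) : Int)) 1 = 1
                   then ((m.log2 : Nat) : Int) + 1 else -(((m.log2 : Nat) : Int) + 1)])
        = acc ++ (pvAsc bp m).reverse
      have h2 : 2 ^ m.log2 ≤ m := Nat.log2_self_le hm0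
      have hpos : 0 < 2 ^ m.log2 := Nat.two_pow_pos m.log2
      have hlt : m - 2 ^ m.log2 < m := by omega
      have hj0 : m.log2 < 32 := pvLog2Lt m hm0 hb
      have h3 : m < 2 ^ (m.log2 + 1) := Nat.lt_log2_self
      have hpow : 2 ^ (m.log2 + 1) = 2 ^ m.log2 * 2 := pow_succ 2 m.log2
      have hr : m - 2 ^ m.log2 < 2 ^ m.log2 := by omega
      have hbr : ∀ i, 32 ≤ i → (m - 2 ^ m.log2).testBit i = false := by
        intro i hi
        exact Nat.testBit_lt_two_pow
          (Nat.lt_of_lt_of_le hr (Nat.pow_le_pow_right (by norm_num) (by omega)))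
      rw [IH _ hlt hbr]
      have hlitB : (if Int.land (bp >>> ((m.log2 : Nat) : Int)) 1 = 1
            then ((m.log2 : Nat) : Int) + 1 else -(((m.log2 : Nat) : Int) + 1))
          = pvLit bp m.log2 := by
        by_cases hp : bp.testBit m.log2 = true
        · rw [if_pos ((pvLandB bp m.log2).mpr hp), pvLit, if_pos hp]
        · rw [if_neg (fun hc => hp ((pvLandB bp m.log2).mp hc)), pvLit,
            if_neg (fun hc => hp hc)]
      rw [hlitB, pvAscSplit bp m hm0 hb, List.reverse_append]
      simp

-- ===== VERDICT (by name: the statement is the Claim_ definition above) =====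
theorem term_from_bit_mask_and_pattern_spec : Claim_equal_term_from_bit_mask_and_pattern := by
  intro bm bp _
  show term_from_bit_mask_and_pattern bm bp = term_from_bit_mask_and_pattern_alt bm bp
  rw [pvAscA, term_from_bit_mask_and_pattern_alt,
    pvLoopB bp _ (pvMaskHigh bm), List.nil_append, List.reverse_reverse]
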